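-- pv_equiv track=rewrite | github.com/gprielipp2026/si342 | extra03/sol1.py | modsetsize
-- ===== SOURCE A (Python) =====
-- def modsetsize(N: int) -> int:
--     X_N = set()
--     x = 0
--     for i in range(1, N+1):
--         x = (x*x + x + 1) % N
--         if x in X_N:
--             break
--         else:
--             X_N.add(x)
--     return len(X_N)
-- ===== SOURCE B (Python) =====
-- def modsetsize(N: int) -> int:
--     # Floyd cycle detection on x -> (x*x + x + 1) % N: answer = tail length + cycle length.
--     if N <= 0:
--         return 0
--     def f(x):
--         return (x * x + x + 1) % N
--     s0 = f(0)
--     # Phase 1: find a meeting point of tortoise and hare.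
--     slow = f(s0)
--     fast = f(f(s0))
--     while slow != fast:
--         slow = f(slow)
--         fast = f(f(fast))
--     # Phase 2: tail length mu.
--     mu = 0
--     p = s0
--     while p != slow:
--         p = f(p)
--         slow = f(slow)
--         mu += 1
--     # Phase 3: cycle length lam.
--     lam = 1
--     q = f(p)
--     while q != p:
--         q = f(q)
--         lam += 1
--     return mu + lam
-- ===== Notes on version B (the rewrite author's own statement) =====
-- stated objective: alternative
-- what changed: Replaced A's visited-set loop (O(rho) extra memory, hash set) by Floyd tortoise/hare cycle detection computing tail length mu plus cycle length lambda of the orbit of x -> (x*x+x+1) % N with O(1) extra memory.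
import Mathlib
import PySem

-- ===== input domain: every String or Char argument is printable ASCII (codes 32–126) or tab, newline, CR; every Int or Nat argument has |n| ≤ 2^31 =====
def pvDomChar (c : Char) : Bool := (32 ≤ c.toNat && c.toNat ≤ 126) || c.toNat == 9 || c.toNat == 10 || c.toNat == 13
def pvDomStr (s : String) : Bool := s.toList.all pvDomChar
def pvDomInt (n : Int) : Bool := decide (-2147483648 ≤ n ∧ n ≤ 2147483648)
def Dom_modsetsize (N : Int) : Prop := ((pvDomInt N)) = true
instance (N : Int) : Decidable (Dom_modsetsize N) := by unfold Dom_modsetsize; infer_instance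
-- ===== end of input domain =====

-- B replaces A's visited-set loop by Floyd tortoise/hare cycle detection (tail length + cycle
-- length, O(1) extra memory); equal return value on every int N.

-- ===== PORT A =====
-- A's for-loop over range(1, N+1) with a visited set and early break, step for step.
def modsetsizeLoop (N : Int) : List Int → Int → PySem.Set Int → Int
  | [], _, X => PySem.Set.len X
  | _ :: is, x, X =>
    let x' := PySem.Int.mod (x * x + x + 1) N
    if PySem.Set.contains X x' then PySem.Set.len X
    else modsetsizeLoop N is x' (PySem.Set.add X x')

def modsetsize (N : Int) : Int :=
  modsetsizeLoop N (PySem.List.pyRange 1 (N + 1) 1) 0 PySem.Set.empty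

-- ===== PORT B =====
def pvF (N x : Int) : Int := PySem.Int.mod (x * x + x + 1) N

-- while slow != fast: slow = f(slow); fast = f(f(fast))   (fueled while-loop)
def pvMeet (N : Int) : Nat → Int → Int → Int
  | 0, slow, _ => slow
  | fuel + 1, slow, fast =>
    if slow = fast then slow
    else pvMeet N fuel (pvF N slow) (pvF N (pvF N fast))

-- while p != slow: p = f(p); slow = f(slow); mu += 1
def pvPhase2 (N : Int) : Nat → Int → Int → Int → Int × Int
  | 0, p, _, mu => (mu, p)
  | fuel + 1, p, slow, mu =>
    if p = slow then (mu, p)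
    else pvPhase2 N fuel (pvF N p) (pvF N slow) (mu + 1)

-- while q != p: q = f(q); lam += 1
def pvPhase3 (N : Int) : Nat → Int → Int → Int → Int
  | 0, _, _, lam => lam
  | fuel + 1, q, p, lam =>
    if q = p then lam
    else pvPhase3 N fuel (pvF N q) p (lam + 1)

def modsetsize_alt (N : Int) : Int :=
  if N ≤ 0 then 0
  else
    let fuel := N.toNat
    let s0 := pvF N 0
    let slow := pvMeet N fuel (pvF N s0) (pvF N (pvF N s0))
    let mp := pvPhase2 N fuel s0 slow 0
    mp.1 + pvPhase3 N fuel (pvF N mp.2) mp.2 1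

-- ===== PRECONDITION & SPEC =====
def Spec_modsetsize (N : Int) (out : Int) : Prop := out = modsetsize_alt N
instance (N : Int) (out : Int) : Decidable (Spec_modsetsize N out) := by unfold Spec_modsetsize; infer_instance

-- ===== CLAIM (what is proved, stated in full; the proofs are below) =====
def Claim_equal_modsetsize : Prop := ∀ (N : Int), Dom_modsetsize N → Spec_modsetsize N (modsetsize N)

-- ===== LEMMAS AND PROOFS =====

-- the iterate sequence: sIt N k = f^(k+1)(0), the k-th value A stores / B traverses
def sIt (N : Int) (k : Nat) : Int := (pvF N)^[k] (pvF N 0)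

theorem sIt_succ (N : Int) (k : Nat) : sIt N (k + 1) = pvF N (sIt N k) := by
  unfold sIt; rw [Function.iterate_succ_apply']

theorem sIt_congr (N : Int) {a b : Nat} (h : a = b) : sIt N a = sIt N b := by rw [h]

theorem pvF_mem (N : Int) (hN : 1 ≤ N) (x : Int) : 0 ≤ pvF N x ∧ pvF N x < N := by
  unfold pvF
  rw [PySem.Int.mod_eq_emod_of_pos (by omega : (0:ℤ) < N)]
  exact ⟨Int.emod_nonneg _ (by omega), Int.emod_lt_of_pos _ (by omega)⟩

theorem sIt_mem (N : Int) (hN : 1 ≤ N) (k : Nat) : sIt N k ∈ Finset.Ico (0:ℤ) N := by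
  cases k with
  | zero => simpa [sIt, Finset.mem_Ico] using pvF_mem N hN 0
  | succ k => rw [sIt_succ]; simpa [Finset.mem_Ico] using pvF_mem N hN (sIt N k)

-- r is a "repeat index": sIt r already occurred before
abbrev RepIx (N : Int) (r : Nat) : Prop := ∃ i, i < r ∧ sIt N i = sIt N r

theorem ex_rep (N : Int) (hN : 1 ≤ N) : ∃ r, RepIx N r := by
  obtain ⟨i, hi, j, hj, hne, heq⟩ :=
    Finset.exists_ne_map_eq_of_card_lt_of_maps_to
      (s := Finset.range (N.toNat + 1)) (t := Finset.Ico (0:ℤ) N) (f := sIt N)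
      (by rw [Int.card_Ico, Finset.card_range]; omega) (fun a _ => sIt_mem N hN a)
  rcases Nat.lt_or_ge i j with h | h
  · exact ⟨j, i, h, heq⟩
  · exact ⟨i, j, by omega, heq.symm⟩

def rhoN (N : Int) (hN : 1 ≤ N) : Nat := Nat.find (ex_rep N hN)

theorem ex_mu (N : Int) (hN : 1 ≤ N) : ∃ i, i < rhoN N hN ∧ sIt N i = sIt N (rhoN N hN) :=
  Nat.find_spec (ex_rep N hN)

def muN (N : Int) (hN : 1 ≤ N) : Nat := Nat.find (ex_mu N hN)

def lamN (N : Int) (hN : 1 ≤ N) : Nat := rhoN N hN - muN N hN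

theorem mu_lt_rho (N : Int) (hN : 1 ≤ N) : muN N hN < rhoN N hN :=
  (Nat.find_spec (ex_mu N hN)).1

theorem s_mu_eq_s_rho (N : Int) (hN : 1 ≤ N) : sIt N (muN N hN) = sIt N (rhoN N hN) :=
  (Nat.find_spec (ex_mu N hN)).2

theorem mu_add_lam (N : Int) (hN : 1 ≤ N) : muN N hN + lamN N hN = rhoN N hN := by
  have := mu_lt_rho N hN; unfold lamN; omega

theorem lam_pos (N : Int) (hN : 1 ≤ N) : 1 ≤ lamN N hN := by
  have := mu_lt_rho N hN; unfold lamN; omega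

-- minimality of rho: no repeat strictly below rho
theorem no_rep_below (N : Int) (hN : 1 ≤ N) {i j : Nat} (hij : i < j) (hj : j < rhoN N hN) :
    sIt N i ≠ sIt N j := by
  intro heq
  exact Nat.find_min (ex_rep N hN) hj ⟨i, hij, heq⟩

theorem rho_le (N : Int) (hN : 1 ≤ N) {r : Nat} (h : RepIx N r) : rhoN N hN ≤ r :=
  Nat.find_min' (ex_rep N hN) h

theorem rho_le_toNat (N : Int) (hN : 1 ≤ N) : rhoN N hN ≤ N.toNat := by
  obtain ⟨i, hi, j, hj, hne, heq⟩ :=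
    Finset.exists_ne_map_eq_of_card_lt_of_maps_to
      (s := Finset.range (N.toNat + 1)) (t := Finset.Ico (0:ℤ) N) (f := sIt N)
      (by rw [Int.card_Ico, Finset.card_range]; omega) (fun a _ => sIt_mem N hN a)
  simp only [Finset.mem_range] at hi hj
  rcases Nat.lt_or_ge i j with h | h
  · exact le_trans (rho_le N hN ⟨i, h, heq⟩) (by omega)
  · exact le_trans (rho_le N hN ⟨j, by omega, heq.symm⟩) (by omega)

-- periodicity from the repeat pair
theorem per_one (N : Int) (hN : 1 ≤ N) (k : Nat) :
    sIt N (muN N hN + k + lamN N hN) = sIt N (muN N hN + k) := by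
  induction k with
  | zero =>
    have h1 : muN N hN + 0 + lamN N hN = rhoN N hN := by have := mu_add_lam N hN; omega
    rw [sIt_congr N h1, ← s_mu_eq_s_rho N hN]
    exact sIt_congr N (by omega)
  | succ k ih =>
    have h1 : muN N hN + (k+1) + lamN N hN = (muN N hN + k + lamN N hN) + 1 := by omega
    rw [sIt_congr N h1, sIt_succ, ih, ← sIt_succ]
    exact sIt_congr N (by omega)

theorem per_mul (N : Int) (hN : 1 ≤ N) (k q : Nat) :
    sIt N (muN N hN + k + q * lamN N hN) = sIt N (muN N hN + k) := by
  induction q with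
  | zero => simp
  | succ q ih =>
    have h1 : muN N hN + k + (q+1) * lamN N hN = muN N hN + (k + q * lamN N hN) + lamN N hN := by ring
    rw [sIt_congr N h1, per_one N hN, sIt_congr N (by omega : muN N hN + (k + q * lamN N hN) = muN N hN + k + q * lamN N hN), ih]

-- reduce an index ≥ mu into the window [mu, rho)
theorem red (N : Int) (hN : 1 ≤ N) {m : Nat} (hm : muN N hN ≤ m) :
    sIt N m = sIt N (muN N hN + (m - muN N hN) % lamN N hN) := by
  have hlam := lam_pos N hN
  have h1 : m = muN N hN + (m - muN N hN) % lamN N hN + ((m - muN N hN) / lamN N hN) * lamN N hN := by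
    have := Nat.mod_add_div' (m - muN N hN) (lamN N hN); omega
  rw [sIt_congr N h1, per_mul N hN]

theorem red_lt (N : Int) (hN : 1 ≤ N) (m : Nat) :
    muN N hN + m % lamN N hN < rhoN N hN := by
  have := Nat.mod_lt m (show 0 < lamN N hN from lam_pos N hN)
  have := mu_add_lam N hN; omega

-- converse (a): a repeated value can only sit at index ≥ mu
theorem conv_mu (N : Int) (hN : 1 ≤ N) {k j : Nat} (hj : 0 < j)
    (heq : sIt N k = sIt N (k + j)) : muN N hN ≤ k := by
  by_contra hk
  rw [Nat.not_le] at hk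
  have hkrho : k < rhoN N hN := lt_trans hk (mu_lt_rho N hN)
  rcases Nat.lt_or_ge (k + j) (muN N hN) with h | h
  · exact no_rep_below N hN (by omega) (lt_trans h (mu_lt_rho N hN)) heq
  · have h2 := red N hN h
    have h3 : sIt N k = sIt N (muN N hN + (k + j - muN N hN) % lamN N hN) := heq.trans h2
    exact no_rep_below N hN (by omega) (red_lt N hN _) h3

-- converse (b): the gap between equal values past mu is a multiple of lam
theorem conv_lam (N : Int) (hN : 1 ≤ N) {k j : Nat} (hk : muN N hN ≤ k)
    (heq : sIt N k = sIt N (k + j)) : lamN N hN ∣ j := by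
  have h1 := red N hN hk
  have h2 := red N hN (show muN N hN ≤ k + j by omega)
  have h3 : sIt N (muN N hN + (k - muN N hN) % lamN N hN)
      = sIt N (muN N hN + (k + j - muN N hN) % lamN N hN) := h1.symm.trans (heq.trans h2)
  by_cases hmod : (k - muN N hN) % lamN N hN = (k + j - muN N hN) % lamN N hN
  · have hj' : (k - muN N hN) % lamN N hN = (k - muN N hN + j) % lamN N hN := by
      rw [hmod]; exact congrArg (· % lamN N hN) (by omega)
    have := (Nat.modEq_iff_dvd' (Nat.le_add_right _ _)).mp hj'
    simpa using this
  · exfalso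
    rcases Nat.lt_or_ge ((k - muN N hN) % lamN N hN) ((k + j - muN N hN) % lamN N hN) with h | h
    · exact no_rep_below N hN (by omega) (red_lt N hN _) h3
    · exact no_rep_below N hN (by omega) (red_lt N hN _) h3.symm

-- forward: equal whenever both ≥ mu and the gap is a multiple of lam
theorem fwd (N : Int) (hN : 1 ≤ N) {k j : Nat} (hk : muN N hN ≤ k) (hdvd : lamN N hN ∣ j) :
    sIt N (k + j) = sIt N k := by
  obtain ⟨c, rfl⟩ := hdvd
  have h1 : k + lamN N hN * c = muN N hN + (k - muN N hN) + c * lamN N hN := by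
    rw [Nat.add_sub_cancel' hk, Nat.mul_comm]
  rw [sIt_congr N h1, per_mul N hN]
  exact sIt_congr N (by omega)

-- ===== Floyd phase 1 =====

abbrev QT (N : Int) (t : Nat) : Prop := 0 < t ∧ sIt N t = sIt N (2 * t)

def t0N (N : Int) (hN : 1 ≤ N) : Nat := lamN N hN * (muN N hN / lamN N hN + 1)

theorem t0_facts (N : Int) (hN : 1 ≤ N) :
    0 < t0N N hN ∧ muN N hN ≤ t0N N hN ∧ t0N N hN ≤ rhoN N hN := by
  have hlam := lam_pos N hN
  have hdm := Nat.div_add_mod (muN N hN) (lamN N hN)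
  have hmlt := Nat.mod_lt (muN N hN) (show 0 < lamN N hN from hlam)
  have hexp : t0N N hN = lamN N hN * (muN N hN / lamN N hN) + lamN N hN := by unfold t0N; ring
  have := mu_add_lam N hN
  omega

theorem t0_meet (N : Int) (hN : 1 ≤ N) : QT N (t0N N hN) := by
  refine ⟨(t0_facts N hN).1, ?_⟩
  have h2 : sIt N (2 * t0N N hN) = sIt N (t0N N hN + t0N N hN) := sIt_congr N (by ring)
  rw [h2]
  exact (fwd N hN (t0_facts N hN).2.1 (Dvd.intro _ rfl)).symm

theorem ex_meet (N : Int) (hN : 1 ≤ N) : ∃ t, QT N t := ⟨t0N N hN, t0_meet N hN⟩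

def TN (N : Int) (hN : 1 ≤ N) : Nat := Nat.find (ex_meet N hN)

theorem T_spec (N : Int) (hN : 1 ≤ N) : QT N (TN N hN) := Nat.find_spec (ex_meet N hN)

theorem T_le_rho (N : Int) (hN : 1 ≤ N) : TN N hN ≤ rhoN N hN :=
  le_trans (Nat.find_min' (ex_meet N hN) (t0_meet N hN)) (t0_facts N hN).2.2

theorem T_mu_lam (N : Int) (hN : 1 ≤ N) : muN N hN ≤ TN N hN ∧ lamN N hN ∣ TN N hN := by
  obtain ⟨hpos, heq⟩ := T_spec N hN
  have heq' : sIt N (TN N hN) = sIt N (TN N hN + TN N hN) := heq.trans (sIt_congr N (by ring))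
  exact ⟨conv_mu N hN hpos heq', conv_lam N hN (conv_mu N hN hpos heq') heq'⟩

theorem meet_run (N : Int) (hN : 1 ≤ N) :
    ∀ (fuel k : Nat), k + 1 ≤ TN N hN → TN N hN ≤ k + fuel →
      pvMeet N fuel (sIt N (k + 1)) (sIt N (2 * (k + 1))) = sIt N (TN N hN) := by
  intro fuel
  induction fuel with
  | zero => intro k h1 h2; omega
  | succ fuel ih =>
    intro k h1 h2
    rw [pvMeet]
    by_cases hc : sIt N (k + 1) = sIt N (2 * (k + 1))
    · have hT : TN N hN ≤ k + 1 := Nat.find_min' (ex_meet N hN) ⟨by omega, hc⟩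
      have : TN N hN = k + 1 := by omega
      rw [if_pos hc, this]
    · rw [if_neg hc]
      have hT : TN N hN ≠ k + 1 := by
        intro h; exact hc (by rw [← h]; exact (T_spec N hN).2)
      rw [← sIt_succ, ← sIt_succ, ← sIt_succ]
      have e1 : k + 1 + 1 = (k + 1) + 1 := rfl
      have e2 : 2 * (k + 1) + 1 + 1 = 2 * ((k + 1) + 1) := by ring
      rw [sIt_congr N e2]
      exact ih (k + 1) (by omega) (by omega)

-- ===== Floyd phase 2 =====

theorem phase2_run (N : Int) (hN : 1 ≤ N) :
    ∀ (fuel k : Nat) (mu0 : Int), k ≤ muN N hN → muN N hN + 1 ≤ k + fuel →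
      pvPhase2 N fuel (sIt N k) (sIt N (TN N hN + k)) mu0
        = (mu0 + ((muN N hN - k : Nat) : Int), sIt N (muN N hN)) := by
  intro fuel
  induction fuel with
  | zero => intro k mu0 h1 h2; omega
  | succ fuel ih =>
    intro k mu0 h1 h2
    obtain ⟨hTmu, hTlam⟩ := T_mu_lam N hN
    have hTpos : 0 < TN N hN := (T_spec N hN).1
    rw [pvPhase2]
    by_cases hc : sIt N k = sIt N (TN N hN + k)
    · have hk : muN N hN ≤ k := conv_mu N hN hTpos (hc.trans (sIt_congr N (by omega)))
      have : k = muN N hN := by omega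
      subst this
      rw [if_pos hc]
      simp
    · have hk : k < muN N hN := by
        rcases Nat.lt_or_ge k (muN N hN) with h | h
        · exact h
        · exfalso
          exact hc ((fwd N hN h hTlam).symm.trans (sIt_congr N (by omega)))
      rw [if_neg hc, ← sIt_succ, ← sIt_succ]
      rw [sIt_congr N (show TN N hN + k + 1 = TN N hN + (k + 1) by omega)]
      rw [ih (k + 1) (mu0 + 1) (by omega) (by omega)]
      simp only [Prod.mk.injEq, and_true]
      omega

-- ===== Floyd phase 3 =====

theorem phase3_run (N : Int) (hN : 1 ≤ N) :
    ∀ (fuel l : Nat) (lam0 : Int), 1 ≤ l → l ≤ lamN N hN → lamN N hN ≤ l - 1 + fuel →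
      pvPhase3 N fuel (sIt N (muN N hN + l)) (sIt N (muN N hN)) lam0
        = lam0 + ((lamN N hN - l : Nat) : Int) := by
  intro fuel
  induction fuel with
  | zero => intro l lam0 h1 h2 h3; omega
  | succ fuel ih =>
    intro l lam0 h1 h2 h3
    rw [pvPhase3]
    by_cases hc : sIt N (muN N hN + l) = sIt N (muN N hN)
    · have hdvd : lamN N hN ∣ l := conv_lam N hN (le_refl _) hc.symm
      have : l = lamN N hN := Nat.le_antisymm h2 (Nat.le_of_dvd (by omega) hdvd)
      rw [if_pos hc, this]
      simp
    · have hl : l < lamN N hN := by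
        rcases Nat.lt_or_ge l (lamN N hN) with h | h
        · exact h
        · exfalso
          have : l = lamN N hN := by omega
          subst this
          exact hc (fwd N hN (le_refl _) (dvd_refl _))
      rw [if_neg hc, ← sIt_succ]
      rw [sIt_congr N (show muN N hN + l + 1 = muN N hN + (l + 1) by omega)]
      rw [ih (l + 1) (lam0 + 1) (by omega) (by omega) (by omega)]
      omega

-- ===== B returns rho =====

theorem alt_eq_rho (N : Int) (hN : 1 ≤ N) : modsetsize_alt N = ((rhoN N hN : Nat) : Int) := by
  have hrho := rho_le_toNat N hN
  have hmu := mu_lt_rho N hN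
  have hlam := lam_pos N hN
  have hmal := mu_add_lam N hN
  have hT := T_le_rho N hN
  have hTpos := (T_spec N hN).1
  have e1 : pvF N (sIt N 0) = sIt N 1 := (sIt_succ N 0).symm
  have e2 : pvF N (sIt N 1) = sIt N 2 := (sIt_succ N 1).symm
  have hm := meet_run N hN N.toNat 0 (by omega) (by omega)
  norm_num at hm
  have hp2 := phase2_run N hN N.toNat 0 0 (by omega) (by omega)
  norm_num at hp2
  have hp3 := phase3_run N hN N.toNat 1 1 (by omega) (by omega) (by omega)
  unfold modsetsize_alt
  rw [if_neg (by omega : ¬ N ≤ 0)]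
  simp only [e1, e2, show pvF N 0 = sIt N 0 from rfl]
  rw [hm, hp2]
  simp only
  rw [show pvF N (sIt N (muN N hN)) = sIt N (muN N hN + 1) from (sIt_succ N _).symm, hp3]
  omega

-- ===== A returns rho =====

theorem loopA_run (N : Int) (hN : 1 ≤ N) :
    ∀ (l : List Int) (i : Nat) (x : Int),
      pvF N x = sIt N i → i ≤ rhoN N hN → rhoN N hN ≤ i + l.length →
      modsetsizeLoop N l x ((List.range i).map (sIt N)) = ((rhoN N hN : Nat) : Int) := by
  intro l
  induction l with
  | nil =>
    intro i x hx h1 h2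
    simp only [List.length_nil] at h2
    have : i = rhoN N hN := by omega
    subst this
    rw [modsetsizeLoop]
    simp [PySem.Set.len]
  | cons a l ih =>
    intro i x hx h1 h2
    rw [modsetsizeLoop]
    have hx' : PySem.Int.mod (x * x + x + 1) N = sIt N i := hx
    by_cases hmem : PySem.Set.contains ((List.range i).map (sIt N)) (sIt N i)
    · -- s i occurred before: i must be rho
      have hrep : RepIx N i := by
        simp only [PySem.Set.contains, List.contains_eq_mem, decide_eq_true_eq,
          List.mem_map, List.mem_range] at hmem
        obtain ⟨j, hj, hje⟩ := hmem
        exact ⟨j, hj, hje⟩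
      have : i = rhoN N hN := le_antisymm h1 (rho_le N hN hrep)
      subst this
      rw [hx', if_pos hmem]
      simp [PySem.Set.len]
    · have hne : i ≠ rhoN N hN := by
        intro h
        subst h
        obtain ⟨j, hj, hje⟩ := ex_mu N hN
        exact hmem (by
          simp only [PySem.Set.contains, List.contains_eq_mem, decide_eq_true_eq, List.mem_map,
            List.mem_range]
          exact ⟨j, hj, hje⟩)
      rw [hx', if_neg hmem]
      have hadd : PySem.Set.add ((List.range i).map (sIt N)) (sIt N i)
          = (List.range (i + 1)).map (sIt N) := by
        rw [PySem.Set.add, if_neg hmem, List.range_succ, List.map_append, List.map_singleton]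
      rw [hadd]
      exact ih (i + 1) (sIt N i) (sIt_succ N i).symm (by omega) (by simp only [List.length_cons] at h2; omega)

theorem a_eq_rho (N : Int) (hN : 1 ≤ N) : modsetsize N = ((rhoN N hN : Nat) : Int) := by
  unfold modsetsize
  have hlen : (PySem.List.pyRange 1 (N + 1) 1).length = N.toNat := by
    rw [PySem.List.length_pyRange_one]; omega
  have h0 : pvF N 0 = sIt N 0 := rfl
  have := loopA_run N hN (PySem.List.pyRange 1 (N + 1) 1) 0 0 h0 (by omega)
    (by rw [hlen]; exact le_trans (rho_le_toNat N hN) (by omega))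
  simpa [PySem.Set.empty] using this

-- ===== VERDICT (by name: the statement is the Claim_ definition above) =====
theorem modsetsize_spec : Claim_equal_modsetsize := by
  intro N _
  unfold Spec_modsetsize
  by_cases hN : 1 ≤ N
  · rw [a_eq_rho N hN, alt_eq_rho N hN]
  · have hle : N + 1 ≤ 1 := by omega
    unfold modsetsize modsetsize_alt
    rw [PySem.List.pyRange_one_eq_nil hle, if_pos (by omega)]
    simp [modsetsizeLoop, PySem.Set.empty, PySem.Set.len]
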